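-- pv_equiv track=rewrite | github.com/E-Y-R/interview | coding_questions/python/handy.py | findSignatureCountsDFS
-- ===== SOURCE A (Python) =====
-- def findSignatureCountsDFS(arr):
--     # Write your code here
--     def _dfs(i, cnt):
--         visited[i] = True
--         j = arr[i] - 1
--         if not visited[j]:
--             cnt = _dfs(j, cnt+1)
--         cnts[i] = cnt
--         return cnt
--     n = len(arr)
--     visited = [False] * n
--     cnts = [None] * n
--     for a in arr:
--         i = a - 1
--         if visited[i]:
--             continue
--         _dfs(i, 1)
--     return cnts
-- ===== SOURCE B (Python) =====
-- def findSignatureCountsDFS(arr):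
--     n = len(arr)
--     visited = [False] * n
--     cnts = [None] * n
--     for a in arr:
--         i = a - 1
--         if visited[i]:
--             continue
--         path = [i]
--         visited[i] = True
--         j = arr[i] - 1
--         while not visited[j]:
--             visited[j] = True
--             path.append(j)
--             j = arr[j] - 1
--         cnt = len(path)
--         for node in path:
--             cnts[node] = cnt
--     return cnts
-- ===== Notes on version B (the rewrite author's own statement) =====
-- stated objective: alternative
-- what changed: The recursive chain-follow (_dfs, which assigns counts while unwinding the call stack) is replaced by an explicit iterative walk that collects the chain into a path list and then writes len(path) to every node of the path; no recursion remains.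
import Mathlib
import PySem

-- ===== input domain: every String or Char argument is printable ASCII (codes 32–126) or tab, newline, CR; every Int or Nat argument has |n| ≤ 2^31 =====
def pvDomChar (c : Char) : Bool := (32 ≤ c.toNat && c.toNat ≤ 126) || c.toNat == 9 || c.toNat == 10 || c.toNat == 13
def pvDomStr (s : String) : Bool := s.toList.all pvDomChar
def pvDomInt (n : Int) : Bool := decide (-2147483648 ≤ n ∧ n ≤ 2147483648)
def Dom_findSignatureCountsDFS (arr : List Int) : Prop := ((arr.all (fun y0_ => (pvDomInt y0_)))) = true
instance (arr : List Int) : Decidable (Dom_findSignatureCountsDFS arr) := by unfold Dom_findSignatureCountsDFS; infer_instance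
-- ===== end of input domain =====

-- B replaces A's recursive _dfs (counts assigned while unwinding) by an explicit iterative
-- walk that collects the chain into a path list and writes len(path) to each of its nodes;
-- objective: alternative decomposition (no recursion), same asymptotic cost.

-- ===== PORT A =====
-- helper: A's inner recursive _dfs; the Nat fuel only makes the recursion structural
-- (each call marks a fresh node, so `arr.length + 1` fuel never runs out under Pre_)
def dfsA (arr : List Int) : Nat → Int → Int → List Bool → List (Option Int) →
    Int × List Bool × List (Option Int)
  | 0, _, cnt, visited, cnts => (cnt, visited, cnts)
  | fuel + 1, i, cnt, visited, cnts =>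
    let visited1 := PySem.List.pySetD visited i true
    let j := PySem.List.pyGetD arr i 0 - 1
    if PySem.List.pyGetD visited1 j false then
      (cnt, visited1, PySem.List.pySetD cnts i (some cnt))
    else
      let r := dfsA arr fuel j (cnt + 1) visited1 cnts
      (r.1, r.2.1, PySem.List.pySetD r.2.2 i (some r.1))

def findSignatureCountsDFS (arr : List Int) : List (Option Int) :=
  (arr.foldl
    (fun (st : List Bool × List (Option Int)) a =>
      let i := a - 1
      if PySem.List.pyGetD st.1 i false then st
      else
        let r := dfsA arr (arr.length + 1) i 1 st.1 st.2
        (r.2.1, r.2.2))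
    (List.replicate arr.length false, List.replicate arr.length (none : Option Int))).2

-- ===== PORT B =====
-- helper: B's while loop; the Nat fuel only makes the loop structural
-- (each iteration marks a fresh node, so `arr.length` fuel never runs out under Pre_)
def walkB (arr : List Int) : Nat → Int → List Bool → List Int → List Int × List Bool
  | 0, _, visited, path => (path, visited)
  | fuel + 1, j, visited, path =>
    if PySem.List.pyGetD visited j false then (path, visited)
    else walkB arr fuel (PySem.List.pyGetD arr j 0 - 1)
           (PySem.List.pySetD visited j true) (path ++ [j])

def findSignatureCountsDFS_alt (arr : List Int) : List (Option Int) :=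
  (arr.foldl
    (fun (st : List Bool × List (Option Int)) a =>
      let i := a - 1
      if PySem.List.pyGetD st.1 i false then st
      else
        let w := walkB arr arr.length (PySem.List.pyGetD arr i 0 - 1)
                   (PySem.List.pySetD st.1 i true) [i]
        let cnt : Int := w.1.length
        (w.2, w.1.foldl (fun c p => PySem.List.pySetD c p (some cnt)) st.2))
    (List.replicate arr.length false, List.replicate arr.length (none : Option Int))).2

-- ===== PRECONDITION & SPEC =====
-- Pre_ excludes exactly the inputs on which A raises IndexError: some element a of arr
-- has a - 1 outside Python's (negative-wrapping) index range of a length-n list.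
def Pre_findSignatureCountsDFS (arr : List Int) : Prop :=
  ∀ a ∈ arr, -(arr.length : Int) ≤ a - 1 ∧ a - 1 < (arr.length : Int)
instance (arr : List Int) : Decidable (Pre_findSignatureCountsDFS arr) := by
  unfold Pre_findSignatureCountsDFS; infer_instance

def pvWitness_findSignatureCountsDFS : List Int := [2, 1, 3]

def Spec_findSignatureCountsDFS (arr : List Int) (out : List (Option Int)) : Prop := out = findSignatureCountsDFS_alt arr
instance (arr : List Int) (out : List (Option Int)) : Decidable (Spec_findSignatureCountsDFS arr out) := by unfold Spec_findSignatureCountsDFS; infer_instance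

-- ===== CLAIM (what is proved, stated in full; the proofs are below) =====
def Claim_equal_findSignatureCountsDFS : Prop := ∀ (arr : List Int), Dom_findSignatureCountsDFS arr → Pre_findSignatureCountsDFS arr → Spec_findSignatureCountsDFS arr (findSignatureCountsDFS arr)

-- ===== LEMMAS AND PROOFS =====

-- the Nat index Python's negative-wrapping indexing resolves to (under InRange)
def pvNorm (n : Nat) (i : Int) : Nat := if 0 ≤ i then i.toNat else n - (-i).toNat

-- writing the same value to every index of a list of indices (B's final for-loop)
def pvWrite (c : List (Option Int)) (ns : List Int) (v : Int) : List (Option Int) :=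
  ns.foldl (fun c p => PySem.List.pySetD c p (some v)) c

theorem dfsA_succ (arr : List Int) (fuel : Nat) (i cnt : Int)
    (visited : List Bool) (cnts : List (Option Int)) :
    dfsA arr (fuel + 1) i cnt visited cnts =
      if PySem.List.pyGetD (PySem.List.pySetD visited i true)
          (PySem.List.pyGetD arr i 0 - 1) false then
        (cnt, PySem.List.pySetD visited i true, PySem.List.pySetD cnts i (some cnt))
      else
        ((dfsA arr fuel (PySem.List.pyGetD arr i 0 - 1) (cnt + 1)
            (PySem.List.pySetD visited i true) cnts).1,
         (dfsA arr fuel (PySem.List.pyGetD arr i 0 - 1) (cnt + 1)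
            (PySem.List.pySetD visited i true) cnts).2.1,
         PySem.List.pySetD
           (dfsA arr fuel (PySem.List.pyGetD arr i 0 - 1) (cnt + 1)
              (PySem.List.pySetD visited i true) cnts).2.2 i
           (some (dfsA arr fuel (PySem.List.pyGetD arr i 0 - 1) (cnt + 1)
              (PySem.List.pySetD visited i true) cnts).1)) := rfl

theorem walkB_succ (arr : List Int) (fuel : Nat) (j : Int) (v : List Bool) (p : List Int) :
    walkB arr (fuel + 1) j v p =
      if PySem.List.pyGetD v j false then (p, v)
      else walkB arr fuel (PySem.List.pyGetD arr j 0 - 1)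
             (PySem.List.pySetD v j true) (p ++ [j]) := rfl

theorem pvIdx_eq (n : Nat) (i : Int) (h : PySem.Raise.InRange n i) :
    PySem.List.pyIdx? n i = some (pvNorm n i) := by
  obtain ⟨h1, h2⟩ := h
  unfold PySem.List.pyIdx? pvNorm
  split_ifs <;> simp_all

theorem pvNorm_lt (n : Nat) (i : Int) (h : PySem.Raise.InRange n i) : pvNorm n i < n := by
  obtain ⟨h1, h2⟩ := h
  unfold pvNorm
  split_ifs <;> omega

theorem pvGetD_eq {α : Type} (xs : List α) (i : Int) (d : α)
    (h : PySem.Raise.InRange xs.length i) :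
    PySem.List.pyGetD xs i d = xs.getD (pvNorm xs.length i) d := by
  have hlt := pvNorm_lt xs.length i h
  simp [PySem.List.pyGetD, PySem.List.pyGet?, pvIdx_eq _ _ h, List.getD]

theorem pvSetD_eq {α : Type} (xs : List α) (i : Int) (v : α)
    (h : PySem.Raise.InRange xs.length i) :
    PySem.List.pySetD xs i v = xs.set (pvNorm xs.length i) v := by
  simp [PySem.List.pySetD, PySem.List.pySet?, pvIdx_eq _ _ h]

theorem pvSetD_out {α : Type} (xs : List α) (i : Int) (v : α)
    (h : ¬ PySem.Raise.InRange xs.length i) :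
    PySem.List.pySetD xs i v = xs := by
  simp only [PySem.Raise.InRange, not_and_or, not_le, not_lt] at h
  unfold PySem.List.pySetD PySem.List.pySet? PySem.List.pyIdx?
  split_ifs <;> simp_all <;> omega

theorem pvSetD_length {α : Type} (xs : List α) (i : Int) (v : α) :
    (PySem.List.pySetD xs i v).length = xs.length := by
  by_cases h : PySem.Raise.InRange xs.length i
  · rw [pvSetD_eq _ _ _ h]; simp
  · rw [pvSetD_out _ _ _ h]

theorem pvSetD_comm {α : Type} (c : List α) (i p : Int) (x : α) :
    PySem.List.pySetD (PySem.List.pySetD c i x) p x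
      = PySem.List.pySetD (PySem.List.pySetD c p x) i x := by
  by_cases hi : PySem.Raise.InRange c.length i
  · by_cases hp : PySem.Raise.InRange c.length p
    · rw [pvSetD_eq _ _ _ hi, pvSetD_eq _ _ _ hp,
        pvSetD_eq (c.set (pvNorm c.length i) x) p x (by simpa using hp),
        pvSetD_eq (c.set (pvNorm c.length p) x) i x (by simpa using hi)]
      simp only [List.length_set]
      by_cases hne : pvNorm c.length i = pvNorm c.length p
      · rw [hne, List.set_set]
      · exact List.set_comm x x hne
    · have hp' : ¬ PySem.Raise.InRange (PySem.List.pySetD c i x).length p := by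
        rwa [pvSetD_length]
      rw [pvSetD_out _ _ _ hp', pvSetD_out _ _ _ hp]
  · have hi' : ¬ PySem.Raise.InRange (PySem.List.pySetD c p x).length i := by
      rwa [pvSetD_length]
    rw [pvSetD_out _ _ _ hi', pvSetD_out _ _ _ hi]

theorem pvCount_pos (v : List Bool) (k : Nat) (hk : k < v.length)
    (hv : v.getD k false = false) : 0 < v.count false := by
  have h1 : v[k] = false := by rwa [List.getD_eq_getElem v false hk] at hv
  exact List.count_pos_iff.mpr (h1 ▸ List.getElem_mem hk)

theorem pvCount_set (v : List Bool) (k : Nat) (hk : k < v.length)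
    (hv : v.getD k false = false) :
    (v.set k true).count false + 1 = v.count false := by
  induction v generalizing k with
  | nil => simp at hk
  | cons b t ih =>
    cases k with
    | zero =>
      simp only [List.getD_cons_zero] at hv
      subst hv
      simp
    | succ k =>
      simp only [List.getD_cons_succ] at hv
      simp only [List.length_cons, Nat.succ_lt_succ_iff] at hk
      simp only [List.set_cons_succ, List.count_cons]
      have := ih k hk hv
      omega

theorem walk_stop (arr : List Int) (fuel : Nat) (j : Int) (v : List Bool) (p : List Int)
    (h : PySem.List.pyGetD v j false = true) : walkB arr fuel j v p = (p, v) := by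
  cases fuel <;> simp [walkB, h]

theorem walk_acc (arr : List Int) (fuel : Nat) :
    ∀ (j : Int) (v : List Bool) (p : List Int),
    walkB arr fuel j v p = (p ++ (walkB arr fuel j v []).1, (walkB arr fuel j v []).2) := by
  induction fuel with
  | zero => intro j v p; simp [walkB]
  | succ f ih =>
    intro j v p
    by_cases h : PySem.List.pyGetD v j false
    · simp [walkB, h]
    · simp only [walkB, h, Bool.false_eq_true, if_false]
      rw [ih _ _ (p ++ [j]), ih _ _ ([] ++ [j])]
      simp

theorem walk_len (arr : List Int) (fuel : Nat) :
    ∀ (j : Int) (v : List Bool) (p : List Int),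
    (walkB arr fuel j v p).2.length = v.length := by
  induction fuel with
  | zero => intro j v p; simp [walkB]
  | succ f ih =>
    intro j v p
    by_cases h : PySem.List.pyGetD v j false
    · simp [walkB, h]
    · simp only [walkB, h, Bool.false_eq_true, if_false]
      rw [ih]
      exact pvSetD_length v j true

theorem pvWrite_cons (c : List (Option Int)) (n : Int) (ns : List Int) (v : Int) :
    pvWrite c (n :: ns) v = pvWrite (PySem.List.pySetD c n (some v)) ns v := rfl

theorem pvWrite_push (ns : List Int) :
    ∀ (c : List (Option Int)) (i : Int) (v : Int),
    pvWrite (PySem.List.pySetD c i (some v)) ns v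
      = PySem.List.pySetD (pvWrite c ns v) i (some v) := by
  induction ns with
  | nil => intro c i v; rfl
  | cons n ns ih =>
    intro c i v
    rw [pvWrite_cons, pvWrite_cons, pvSetD_comm, ih]

theorem write_step (cnts : List (Option Int)) (i j : Int) (p' : List Int) (cnt : Int) :
    PySem.List.pySetD (pvWrite cnts (j :: p') (cnt + 1 + (p'.length : Int))) i
        (some (cnt + 1 + (p'.length : Int)))
      = pvWrite cnts (i :: ([] ++ [j] ++ p'))
          (cnt + ((([] ++ [j] ++ p').length : Nat) : Int)) := by
  simp only [List.nil_append, List.singleton_append]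
  rw [show (cnt + (((j :: p').length : Nat) : Int)) = cnt + 1 + (p'.length : Int) from by
    push_cast [List.length_cons]; ring]
  rw [pvWrite_cons, pvWrite_push, pvWrite_cons, pvWrite_cons, pvWrite_push, pvWrite_push]
  exact pvSetD_comm _ _ _ _

-- characterisation of A's recursive _dfs by B's iterative walk
theorem dfs_eq_walk (arr : List Int) (hpre : Pre_findSignatureCountsDFS arr) :
    ∀ (fuel : Nat) (i cnt : Int) (visited : List Bool) (cnts : List (Option Int)),
    visited.length = arr.length →
    PySem.Raise.InRange arr.length i →
    PySem.List.pyGetD visited i false = false →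
    visited.count false ≤ fuel + 1 →
    dfsA arr (fuel + 1) i cnt visited cnts =
      (cnt + ((walkB arr fuel (PySem.List.pyGetD arr i 0 - 1)
                 (PySem.List.pySetD visited i true) []).1.length : Int),
       (walkB arr fuel (PySem.List.pyGetD arr i 0 - 1)
          (PySem.List.pySetD visited i true) []).2,
       pvWrite cnts
         (i :: (walkB arr fuel (PySem.List.pyGetD arr i 0 - 1)
                  (PySem.List.pySetD visited i true) []).1)
         (cnt + ((walkB arr fuel (PySem.List.pyGetD arr i 0 - 1)
                    (PySem.List.pySetD visited i true) []).1.length : Int))) := by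
  intro fuel
  induction fuel with
  | zero =>
    intro i cnt visited cnts hlen hi hvi hcnt
    have hiv : PySem.Raise.InRange visited.length i := by rwa [hlen]
    have hv1len : (PySem.List.pySetD visited i true).length = arr.length := by
      rw [pvSetD_length, hlen]
    by_cases hj : PySem.List.pyGetD (PySem.List.pySetD visited i true)
        (PySem.List.pyGetD arr i 0 - 1) false
    · rw [dfsA_succ, if_pos hj]
      simp [walkB, pvWrite]
    · exfalso
      have hmem : PySem.List.pyGetD arr i 0 ∈ arr := PySem.List.pyGetD_mem arr 0 hi
      have hj' : PySem.Raise.InRange arr.length (PySem.List.pyGetD arr i 0 - 1) :=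
        hpre _ hmem
      have hj'' : PySem.Raise.InRange (PySem.List.pySetD visited i true).length
          (PySem.List.pyGetD arr i 0 - 1) := by rwa [hv1len]
      have hjf : PySem.List.pyGetD (PySem.List.pySetD visited i true)
          (PySem.List.pyGetD arr i 0 - 1) false = false := by
        simpa using hj
      rw [pvGetD_eq _ _ _ hj''] at hjf
      have hpos := pvCount_pos _ _ (pvNorm_lt _ _ hj'') hjf
      have hset : (PySem.List.pySetD visited i true).count false + 1
          = visited.count false := by
        rw [pvSetD_eq _ _ _ hiv]
        exact pvCount_set visited _ (pvNorm_lt _ _ hiv)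
          (by rw [← pvGetD_eq _ _ _ hiv]; exact hvi)
      omega
  | succ f ih =>
    intro i cnt visited cnts hlen hi hvi hcnt
    have hiv : PySem.Raise.InRange visited.length i := by rwa [hlen]
    have hv1len : (PySem.List.pySetD visited i true).length = arr.length := by
      rw [pvSetD_length, hlen]
    have hmem : PySem.List.pyGetD arr i 0 ∈ arr := PySem.List.pyGetD_mem arr 0 hi
    have hj' : PySem.Raise.InRange arr.length (PySem.List.pyGetD arr i 0 - 1) :=
      hpre _ hmem
    have hj'' : PySem.Raise.InRange (PySem.List.pySetD visited i true).length
        (PySem.List.pyGetD arr i 0 - 1) := by rwa [hv1len]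
    by_cases hj : PySem.List.pyGetD (PySem.List.pySetD visited i true)
        (PySem.List.pyGetD arr i 0 - 1) false
    · rw [walk_stop arr _ _ _ _ hj]
      rw [dfsA_succ, if_pos hj]
      simp [pvWrite]
    · have hjf : PySem.List.pyGetD (PySem.List.pySetD visited i true)
          (PySem.List.pyGetD arr i 0 - 1) false = false := by simpa using hj
      have hset : (PySem.List.pySetD visited i true).count false + 1
          = visited.count false := by
        rw [pvSetD_eq _ _ _ hiv]
        exact pvCount_set visited _ (pvNorm_lt _ _ hiv)
          (by rw [← pvGetD_eq _ _ _ hiv]; exact hvi)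
      have hrec := ih (PySem.List.pyGetD arr i 0 - 1) (cnt + 1)
        (PySem.List.pySetD visited i true) cnts hv1len hj' hjf (by omega)
      rw [dfsA_succ, if_neg (by simp [hjf])]
      rw [hrec]
      conv_rhs => rw [show walkB arr (f + 1) (PySem.List.pyGetD arr i 0 - 1)
          (PySem.List.pySetD visited i true) [] =
        walkB arr f
          (PySem.List.pyGetD arr (PySem.List.pyGetD arr i 0 - 1) 0 - 1)
          (PySem.List.pySetD (PySem.List.pySetD visited i true)
            (PySem.List.pyGetD arr i 0 - 1) true)
          ([] ++ [PySem.List.pyGetD arr i 0 - 1]) from by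
            rw [walkB_succ, if_neg (by simp [hjf])]]
      rw [walk_acc arr f _ _ ([] ++ [PySem.List.pyGetD arr i 0 - 1])]
      refine Prod.ext ?_ (Prod.ext ?_ ?_)
      · simp only [List.nil_append, List.singleton_append, List.length_cons]
        push_cast
        ring
      · rfl
      · exact write_step _ _ _ _ _

-- the two outer loops agree step by step
theorem fold_eq (arr : List Int) (hpre : Pre_findSignatureCountsDFS arr) :
    ∀ (l : List Int), (∀ a ∈ l, a ∈ arr) →
    ∀ (v : List Bool) (c : List (Option Int)), v.length = arr.length →
    l.foldl
      (fun (st : List Bool × List (Option Int)) a =>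
        let i := a - 1
        if PySem.List.pyGetD st.1 i false then st
        else
          let r := dfsA arr (arr.length + 1) i 1 st.1 st.2
          (r.2.1, r.2.2)) (v, c)
    = l.foldl
      (fun (st : List Bool × List (Option Int)) a =>
        let i := a - 1
        if PySem.List.pyGetD st.1 i false then st
        else
          let w := walkB arr arr.length (PySem.List.pyGetD arr i 0 - 1)
                     (PySem.List.pySetD st.1 i true) [i]
          let cnt : Int := w.1.length
          (w.2, w.1.foldl (fun c p => PySem.List.pySetD c p (some cnt)) st.2)) (v, c) := by
  intro l
  induction l with
  | nil => intro _ v c _; rfl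
  | cons a l ih =>
    intro hsub v c hv
    have ha : a ∈ arr := hsub a (by simp)
    have hi : PySem.Raise.InRange arr.length (a - 1) := hpre a ha
    simp only [List.foldl_cons]
    by_cases hg : PySem.List.pyGetD v (a - 1) false
    · simp only [hg, if_true]
      exact ih (fun b hb => hsub b (by simp [hb])) v c hv
    · have hgf : PySem.List.pyGetD v (a - 1) false = false := by simpa using hg
      have hd := dfs_eq_walk arr hpre arr.length (a - 1) 1 v c hv hi hgf
        (le_trans (List.count_le_length) (by omega))
      simp only [hgf, Bool.false_eq_true, if_false]
      rw [hd]
      rw [walk_acc arr arr.length (PySem.List.pyGetD arr (a - 1) 0 - 1)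
        (PySem.List.pySetD v (a - 1) true) [a - 1]]
      have hlen2 : (walkB arr arr.length (PySem.List.pyGetD arr (a - 1) 0 - 1)
          (PySem.List.pySetD v (a - 1) true) []).2.length = arr.length := by
        rw [walk_len, pvSetD_length, hv]
      have hcnteq : (1 : Int) + ((walkB arr arr.length (PySem.List.pyGetD arr (a - 1) 0 - 1)
            (PySem.List.pySetD v (a - 1) true) []).1.length : Int)
          = (([a - 1] ++ (walkB arr arr.length (PySem.List.pyGetD arr (a - 1) 0 - 1)
            (PySem.List.pySetD v (a - 1) true) []).1).length : Int) := by
        simp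
        omega
      rw [show ([a - 1] ++ (walkB arr arr.length (PySem.List.pyGetD arr (a - 1) 0 - 1)
            (PySem.List.pySetD v (a - 1) true) []).1).foldl
          (fun c p => PySem.List.pySetD c p (some (([a - 1] ++ (walkB arr arr.length
            (PySem.List.pyGetD arr (a - 1) 0 - 1)
            (PySem.List.pySetD v (a - 1) true) []).1).length : Int))) c
        = pvWrite c ((a - 1) :: (walkB arr arr.length (PySem.List.pyGetD arr (a - 1) 0 - 1)
            (PySem.List.pySetD v (a - 1) true) []).1)
            (([a - 1] ++ (walkB arr arr.length (PySem.List.pyGetD arr (a - 1) 0 - 1)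
            (PySem.List.pySetD v (a - 1) true) []).1).length : Int) from rfl]
      rw [← hcnteq]
      exact ih (fun b hb => hsub b (by simp [hb])) _ _ hlen2

-- ===== VERDICT (by name: the statement is the Claim_ definition above) =====
theorem findSignatureCountsDFS_spec : Claim_equal_findSignatureCountsDFS := by
  intro arr _ hpre
  unfold Spec_findSignatureCountsDFS findSignatureCountsDFS findSignatureCountsDFS_alt
  exact congrArg Prod.snd
    (fold_eq arr hpre arr (fun a h => h) _ _ (by simp))
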